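-- pv_equiv track=rewrite | github.com/Itissohardtonamemyself/nowcoder | 识别有效ip和掩码.py | iswyan
-- ===== SOURCE A (Python) =====
-- def two(y):
--     o = ''
--     if y>0:
--         while y>0:
--             o = str(y%2)+o
--             y = y//2
--         return '%08d'%int(o)
--     else:
--         return '00000000'
--
-- def iswyan(x):
--     if x == '255.255.255.255' or x == '0.0.0.0':
--         return True
--     t = x.split('.')
--     if len(t)!=4:
--         return True
--     st = ''
--     for i in t:
--         st = st + two(int(i))
--     for i in range(32):
--         if st[i]=='0':
--             for j in range(i+1,32):
--                 if st[j]=='1':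
--                     return True
--     return False
-- ===== SOURCE B (Python) =====
-- def two(y):
--     o = ''
--     if y>0:
--         while y>0:
--             o = str(y%2)+o
--             y = y//2
--         return '%08d'%int(o)
--     else:
--         return '00000000'
--
-- def iswyan(x):
--     if x == '255.255.255.255' or x == '0.0.0.0':
--         return True
--     t = x.split('.')
--     if len(t) != 4:
--         return True
--     st = ''.join(two(int(i)) for i in t)[:32]
--     z = st.find('0')
--     return z != -1 and '1' in st[z:]
-- ===== Notes on version B (the rewrite author's own statement) =====
-- stated objective: simpler
-- what changed: A's quadratic nested index loops searching for a zero bit with a one bit anywhere after it are replaced by the find/membership idiom: locate the first zero in the 32-character bit string and test whether a one occurs from there on; the guards and the bit-string construction are unchanged.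
import Mathlib
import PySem

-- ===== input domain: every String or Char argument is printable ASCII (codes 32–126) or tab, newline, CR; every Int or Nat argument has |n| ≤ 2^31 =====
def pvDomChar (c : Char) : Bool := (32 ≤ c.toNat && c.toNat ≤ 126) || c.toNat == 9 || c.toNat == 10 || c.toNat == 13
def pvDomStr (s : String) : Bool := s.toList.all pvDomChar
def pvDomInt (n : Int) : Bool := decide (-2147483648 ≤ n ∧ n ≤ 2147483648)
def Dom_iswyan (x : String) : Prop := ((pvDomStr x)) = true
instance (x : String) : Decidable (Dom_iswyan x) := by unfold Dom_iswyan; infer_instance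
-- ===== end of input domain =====

-- B replaces A's nested index loops by the standard-library idiom
-- "first index of '0', then membership of '1' after it" (simpler; no explicit loops).

-- ===== PORT A =====
-- helper `two`: while y > 0: o = str(y%2)+o; y = y//2, then '%08d' % int(o)
def pvTwoLoop (y : Int) (o : List Char) : List Char :=
  if 0 < y then
    pvTwoLoop (PySem.Int.floordiv y 2) (PySem.Int.toChars (PySem.Int.mod y 2) ++ o)
  else o
termination_by y.toNat
decreasing_by
  rw [PySem.Int.floordiv_eq_ediv_of_pos (by omega)]
  omega

def pvTwo (y : Int) : List Char :=
  if 0 < y then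
    PySem.Chars.zfill (PySem.Int.toChars ((PySem.Int.ofChars? (pvTwoLoop y [])).getD 0)) 8
  else ['0', '0', '0', '0', '0', '0', '0', '0']

def iswyan (x : String) : Bool :=
  if x == "255.255.255.255" || x == "0.0.0.0" then true
  else
    let t := PySem.Chars.splitOn x.toList ['.']
    if t.length ≠ 4 then true
    else
      let st := t.foldl (fun acc i => acc ++ pvTwo ((PySem.Int.ofChars? i).getD 0)) ([] : List Char)
      (PySem.List.pyRange 0 32).any (fun i =>
        (PySem.List.pyGet? st i == some '0') &&
        (PySem.List.pyRange (i + 1) 32).any (fun j => PySem.List.pyGet? st j == some '1'))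

-- ===== PORT B =====
def iswyan_alt (x : String) : Bool :=
  if x == "255.255.255.255" || x == "0.0.0.0" then true
  else
    let t := PySem.Chars.splitOn x.toList ['.']
    if t.length ≠ 4 then true
    else
      let st := PySem.List.slice
        (PySem.Chars.join [] (t.map (fun i => pvTwo ((PySem.Int.ofChars? i).getD 0))))
        none (some 32)
      let z := PySem.Chars.find st ['0']
      (z != -1) && PySem.Chars.isIn ['1'] (PySem.List.slice st (some z) none)

-- ===== PRECONDITION & SPEC =====
-- Pre_ excludes exactly the inputs where A raises ValueError at `int(i)` (a part of the
-- dot-split that is not an int literal, reached only when the split has length 4 and x is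
-- neither special constant); B raises there too.
def Pre_iswyan (x : String) : Prop :=
  x = "255.255.255.255" ∨ x = "0.0.0.0" ∨
  (PySem.Chars.splitOn x.toList ['.']).length ≠ 4 ∨
  ∀ p ∈ PySem.Chars.splitOn x.toList ['.'], (PySem.Int.ofChars? p).isSome = true
instance (x : String) : Decidable (Pre_iswyan x) := by unfold Pre_iswyan; infer_instance

def pvWitness_iswyan : String := "1.2.3.4"

def Spec_iswyan (x : String) (out : Bool) : Prop := out = iswyan_alt x
instance (x : String) (out : Bool) : Decidable (Spec_iswyan x out) := by unfold Spec_iswyan; infer_instance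

-- ===== CLAIM (what is proved, stated in full; the proofs are below) =====
def Claim_equal_iswyan : Prop := ∀ (x : String), Dom_iswyan x → Pre_iswyan x → Spec_iswyan x (iswyan x)

-- ===== LEMMAS AND PROOFS =====

-- "there is a '0' strictly before a '1'" in u
def pvQ (u : List Char) : Prop := ∃ a b : Nat, a < b ∧ u[a]? = some '0' ∧ u[b]? = some '1'

-- [c] is a prefix of u.drop k iff u has c at position k
theorem pvPrefixSingle (u : List Char) (k : Nat) (c : Char) :
    [c] <+: u.drop k ↔ u[k]? = some c := by
  constructor
  · rintro ⟨s, hs⟩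
    have h0 : (u.drop k)[0]? = some c := by rw [← hs]; rfl
    simpa [List.getElem?_drop] using h0
  · intro h
    have h0 : (u.drop k)[0]? = some c := by simpa [List.getElem?_drop] using h
    cases hd : u.drop k with
    | nil => simp [hd] at h0
    | cons a t => simp [hd] at h0; exact ⟨t, by simp [h0]⟩

theorem pvMemDrop (u : List Char) (k : Nat) (c : Char) :
    c ∈ u.drop k ↔ ∃ b : Nat, k ≤ b ∧ u[b]? = some c := by
  rw [List.mem_iff_getElem?]
  constructor
  · rintro ⟨i, hi⟩; exact ⟨k + i, by omega, by simpa [List.getElem?_drop] using hi⟩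
  · rintro ⟨b, hb, h⟩; exact ⟨b - k, by rw [List.getElem?_drop]; rwa [Nat.add_sub_cancel' hb]⟩

-- A's nested loops over the first 32 positions of l, characterised
theorem pvLeft (l : List Char) :
    ((PySem.List.pyRange 0 32).any (fun i =>
      (PySem.List.pyGet? l i == some '0') &&
      (PySem.List.pyRange (i + 1) 32).any (fun j => PySem.List.pyGet? l j == some '1'))) = true
    ↔ pvQ (l.take 32) := by
  constructor
  · intro hL
    obtain ⟨i, hi, hc⟩ := List.any_eq_true.mp hL
    rw [Bool.and_eq_true, beq_iff_eq] at hc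
    obtain ⟨h0, hin⟩ := hc
    obtain ⟨j, hj, h1⟩ := List.any_eq_true.mp hin
    rw [beq_iff_eq] at h1
    rw [PySem.List.mem_pyRange_one] at hi hj
    obtain ⟨a, rfl⟩ := Int.eq_ofNat_of_zero_le hi.1
    obtain ⟨b, rfl⟩ := Int.eq_ofNat_of_zero_le (by omega : (0:Int) ≤ j)
    rw [PySem.List.pyGet?_natCast] at h0 h1
    refine ⟨a, b, by exact_mod_cast (by omega : (a:Int) < (b:Int)), ?_, ?_⟩
    · rw [List.getElem?_take_of_lt (by exact_mod_cast hi.2)]; exact h0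
    · rw [List.getElem?_take_of_lt (by exact_mod_cast hj.2)]; exact h1
  · rintro ⟨a, b, hab, ha, hb⟩
    have hbl : b < (l.take 32).length := (List.getElem?_eq_some_iff.mp hb).1
    have hb32 : b < 32 := lt_of_lt_of_le hbl (by simp)
    have ha32 : a < 32 := lt_trans hab hb32
    rw [List.getElem?_take_of_lt ha32] at ha
    rw [List.getElem?_take_of_lt hb32] at hb
    apply List.any_eq_true.mpr
    refine ⟨(a : Int), PySem.List.mem_pyRange_one.mpr ⟨by positivity, by exact_mod_cast ha32⟩, ?_⟩
    rw [Bool.and_eq_true, beq_iff_eq, PySem.List.pyGet?_natCast]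
    refine ⟨ha, List.any_eq_true.mpr ⟨(b : Int),
      PySem.List.mem_pyRange_one.mpr ⟨by exact_mod_cast hab, by exact_mod_cast hb32⟩, ?_⟩⟩
    rw [beq_iff_eq, PySem.List.pyGet?_natCast]
    exact hb

-- B's find/membership form, characterised the same way
theorem pvRight (l : List Char) :
    ((PySem.Chars.find (l.take 32) ['0'] != -1) &&
      PySem.Chars.isIn ['1']
        (PySem.List.slice (l.take 32) (some (PySem.Chars.find (l.take 32) ['0'])) none)) = true
    ↔ pvQ (l.take 32) := by
  by_cases hz : PySem.Chars.find (l.take 32) ['0'] = -1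
  · rw [hz]
    constructor
    · intro h; simp at h
    · rintro ⟨a, b, hab, ha, hb⟩
      exfalso
      have hmem : '0' ∈ l.take 32 := List.mem_of_getElem? ha
      exact (PySem.Chars.find_eq_neg_one_iff _ _).mp hz
        ((List.singleton_infix_iff '0' _).mpr hmem)
  · have hz0 : 0 ≤ PySem.Chars.find (l.take 32) ['0'] := by
      have := PySem.Chars.neg_one_le_find (l.take 32) ['0']
      omega
    obtain ⟨hpre, hmin⟩ := PySem.Chars.find_spec hz0
    have hz0' : (l.take 32)[(PySem.Chars.find (l.take 32) ['0']).toNat]? = some '0' :=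
      (pvPrefixSingle _ _ _).mp hpre
    rw [PySem.List.slice_from _ hz0]
    rw [(bne_iff_ne.mpr hz : _ = true), Bool.true_and]
    rw [PySem.Chars.isIn_iff_infix, List.singleton_infix_iff, pvMemDrop]
    constructor
    · rintro ⟨b, hzb, hb⟩
      have hne : b ≠ (PySem.Chars.find (l.take 32) ['0']).toNat := by
        intro e; rw [e, hz0'] at hb; simp at hb
      exact ⟨_, b, by omega, hz0', hb⟩
    · rintro ⟨a, b, hab, ha, hb⟩
      have hza : (PySem.Chars.find (l.take 32) ['0']).toNat ≤ a := by
        by_contra hlt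
        exact hmin a (by omega) ((pvPrefixSingle _ _ _).mpr ha)
      exact ⟨b, by omega, hb⟩

-- joining with the empty separator is flatten
theorem pvJoinNil (ps : List (List Char)) : PySem.Chars.join [] ps = ps.flatten := by
  show [].intercalate ps = ps.flatten
  induction ps with
  | nil => rfl
  | cons h t ih =>
    cases t with
    | nil => simp [List.intercalate]
    | cons h2 t2 =>
      simp [List.intercalate, List.intersperse] at ih ⊢
      simpa using ih

-- B's st is the first 32 characters of A's st
theorem pvStEq (t : List (List Char)) (g : List Char → List Char) :
    PySem.List.slice (PySem.Chars.join [] (t.map g)) none (some 32)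
      = (t.foldl (fun acc i => acc ++ g i) []).take 32 := by
  rw [PySem.List.foldl_append_eq_flatMap, List.nil_append,
      PySem.List.slice_to _ (by norm_num), pvJoinNil]
  congr 1

-- ===== VERDICT (by name: the statement is the Claim_ definition above) =====
theorem iswyan_spec : Claim_equal_iswyan := by
  intro x _ _
  unfold Spec_iswyan iswyan iswyan_alt
  by_cases h1 : (x == "255.255.255.255" || x == "0.0.0.0") = true
  · simp only [h1, if_true]
  · rw [Bool.not_eq_true] at h1
    simp only [h1, Bool.false_eq_true, if_false]
    by_cases h2 : (PySem.Chars.splitOn x.toList ['.']).length ≠ 4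
    · rw [if_pos h2, if_pos h2]
    · rw [if_neg h2, if_neg h2]
      rw [pvStEq]
      rw [Bool.eq_iff_iff, pvLeft, pvRight]
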